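-- pv_equiv track=rewrite | github.com/SolomiiaVikovych/prg-basics | 04-Functions/7_19.py | f
-- ===== SOURCE A (Python) =====
-- def f(number):
--     num_str = str(number)  # Convert the number to a string
--     sum_repeats = 0
--
--     # Loop through each unique digit in the number
--     for digit in set(num_str):
--         count = num_str.count(digit)  # Count occurrences of the digit
--         if count > 1:  # Only if the digit repeats
--             sum_repeats += int(digit) * (count - 1)  # Add the repeated values
--
--     return sum_repeats
-- ===== SOURCE B (Python) =====
-- def f(number):
--     digits = [ch for ch in str(number) if ch.isdigit()]
--     return sum(int(ch) for ch in digits) - sum(int(ch) for ch in set(digits))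
-- ===== Notes on version B (the rewrite author's own statement) =====
-- stated objective: alternative
-- what changed: B drops A's per-distinct-digit count-and-branch loop and instead computes total digit sum minus distinct digit sum, using the identity sum(d*(count-1)) = sum-with-multiplicity - distinct-sum.
import Mathlib
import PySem

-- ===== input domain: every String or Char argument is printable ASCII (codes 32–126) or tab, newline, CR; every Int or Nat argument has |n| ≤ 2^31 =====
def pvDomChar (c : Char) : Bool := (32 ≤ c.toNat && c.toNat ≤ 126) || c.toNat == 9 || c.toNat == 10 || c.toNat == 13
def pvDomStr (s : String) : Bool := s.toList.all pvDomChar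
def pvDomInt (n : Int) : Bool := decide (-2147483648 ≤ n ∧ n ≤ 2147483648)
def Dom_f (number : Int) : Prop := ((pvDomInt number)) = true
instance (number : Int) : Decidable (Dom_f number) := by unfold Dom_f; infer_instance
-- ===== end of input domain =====

-- B replaces A's per-distinct-digit count/branch loop by the algebraic identity
-- "sum of all digits minus sum of distinct digits" (objective: alternative decomposition).

-- int(ch) for a single char: cannot raise where the ports evaluate it (the chars of str(int)
-- reaching it are decimal digits), so the .getD 0 default is never used on the claimed domain.
def pvVal (c : Char) : Int := (PySem.Int.ofChars? [c]).getD 0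

-- loop body of A: count = num_str.count(digit); if count > 1: sum += int(digit)*(count-1)
def pvBody (s : List Char) (acc : Int) (d : Char) : Int :=
  let count : Int := (s.count d : Nat)
  if count > 1 then acc + pvVal d * (count - 1) else acc

-- ===== PORT A =====
def f (number : Int) : Int :=
  let numStr := PySem.Int.toChars number
  (PySem.Set.ofList numStr).foldl (pvBody numStr) 0

-- ===== PORT B =====
def f_alt (number : Int) : Int :=
  let digits := (PySem.Int.toChars number).filter PySem.Chars.isdigit
  (digits.map pvVal).sum - ((PySem.Set.ofList digits).map pvVal).sum

-- ===== PRECONDITION & SPEC =====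
def Spec_f (number : Int) (out : Int) : Prop := out = f_alt number
instance (number : Int) (out : Int) : Decidable (Spec_f number out) := by unfold Spec_f; infer_instance

-- ===== CLAIM (what is proved, stated in full; the proofs are below) =====
def Claim_equal_f : Prop := ∀ (number : Int), Dom_f number → Spec_f number (f number)

-- ===== LEMMAS AND PROOFS =====

-- every character produced by Nat.toDigits 10 is a decimal digit
lemma isdigit_digitChar (k : Nat) (h : k < 10) : PySem.Chars.isdigit (Nat.digitChar k) = true := by
  interval_cases k <;> decide

lemma isdigit_toDigitsCore (fuel m : Nat) (acc : List Char)
    (hacc : ∀ c ∈ acc, PySem.Chars.isdigit c = true) :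
    ∀ c ∈ Nat.toDigitsCore 10 fuel m acc, PySem.Chars.isdigit c = true := by
  induction fuel generalizing m acc with
  | zero => simpa [Nat.toDigitsCore] using hacc
  | succ n ih =>
    intro c hc
    simp only [Nat.toDigitsCore] at hc
    by_cases h : m / 10 = 0
    · rw [if_pos h] at hc
      rcases List.mem_cons.mp hc with h1 | h2
      · exact h1 ▸ isdigit_digitChar _ (Nat.mod_lt _ (by norm_num))
      · exact hacc _ h2
    · rw [if_neg h] at hc
      refine ih (m / 10) _ ?_ c hc
      intro d hd
      rcases List.mem_cons.mp hd with h1 | h2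
      · exact h1 ▸ isdigit_digitChar _ (Nat.mod_lt _ (by norm_num))
      · exact hacc _ h2

lemma isdigit_toDigits (m : Nat) : ∀ c ∈ Nat.toDigits 10 m, PySem.Chars.isdigit c = true :=
  isdigit_toDigitsCore _ _ [] (by simp)

-- non-digit characters of str(n) occur at most once (only a leading '-')
lemma nondigit_count_le_one (n : Int) (c : Char)
    (hc : PySem.Chars.isdigit c = false) : (PySem.Int.toChars n).count c ≤ 1 := by
  unfold PySem.Int.toChars
  split
  · have hnot : c ∉ Nat.toDigits 10 n.natAbs := fun hm => by
      simpa [hc] using isdigit_toDigits _ c hm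
    rcases eq_or_ne c '-' with rfl | hne
    · simp [List.count_eq_zero_of_not_mem hnot]
    · simp [(Ne.symm hne : ¬ '-' = c), List.count_eq_zero_of_not_mem hnot]
  · have hnot : c ∉ Nat.toDigits 10 n.toNat := fun hm => by
      simpa [hc] using isdigit_toDigits _ c hm
    simp [List.count_eq_zero_of_not_mem hnot]

-- sum of a function over a PySem.Set as a Finset sum
lemma sum_map_ofList (s : List Char) (g : Char → Int) :
    ((PySem.Set.ofList s).map g).sum = ∑ x ∈ s.toFinset, g x := by
  rw [← List.sum_toFinset _ (PySem.Set.nodup_ofList s)]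
  apply Finset.sum_congr _ (fun _ _ => rfl)
  apply Finset.ext
  intro a
  simp [PySem.Set.mem_ofList]

-- the core algebraic identity, for any character list whose non-digit chars are unrepeated
lemma key (s : List Char)
    (H : ∀ c ∈ s, PySem.Chars.isdigit c = false → s.count c ≤ 1) :
    (PySem.Set.ofList s).foldl (pvBody s) 0
    = ((s.filter PySem.Chars.isdigit).map pvVal).sum
      - ((PySem.Set.ofList (s.filter PySem.Chars.isdigit)).map pvVal).sum := by
  have h1 : (PySem.Set.ofList s).foldl (pvBody s) 0
      = ((PySem.Set.ofList s).map
          (fun d => if ((s.count d : Nat) : Int) > 1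
                    then pvVal d * (((s.count d : Nat) : Int) - 1) else 0)).sum := by
    have hcong : (PySem.Set.ofList s).foldl (pvBody s) 0
        = (PySem.Set.ofList s).foldl
            (fun acc d => acc + (if ((s.count d : Nat) : Int) > 1
              then pvVal d * (((s.count d : Nat) : Int) - 1) else 0)) 0 :=
      PySem.List.foldl_congr_mem _ _ _ _ (by
        intro acc d _
        simp only [pvBody]
        by_cases h : ((s.count d : Nat) : Int) > 1 <;> simp [h])
    rw [hcong, PySem.List.foldl_add]
    ring
  have hdsfin : (s.filter PySem.Chars.isdigit).toFinset
      = s.toFinset.filter (fun c => PySem.Chars.isdigit c) := List.toFinset_filter _ _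
  rw [h1, sum_map_ofList, Finset.sum_list_map_count, sum_map_ofList, hdsfin,
      Finset.sum_filter, Finset.sum_filter, ← Finset.sum_sub_distrib]
  apply Finset.sum_congr rfl
  intro c hc
  have hcs : c ∈ s := List.mem_toFinset.mp hc
  by_cases hd : PySem.Chars.isdigit c = true
  · have hcnt : (s.filter PySem.Chars.isdigit).count c = s.count c := by
      simp [List.count_filter, hd]
    have hpos : 1 ≤ s.count c := List.one_le_count_iff.mpr hcs
    rw [if_pos hd, if_pos hd, hcnt, nsmul_eq_mul]
    rcases Nat.lt_or_ge 1 (s.count c) with hgt | hle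
    · rw [if_pos (by exact_mod_cast hgt)]; ring
    · have h1 : s.count c = 1 := le_antisymm hle hpos
      rw [h1]; norm_num
  · have hle : s.count c ≤ 1 := H c hcs (by simpa using hd)
    rw [if_neg (by exact_mod_cast Nat.not_lt.mpr hle), if_neg (by simpa using hd),
        if_neg (by simpa using hd)]
    norm_num

-- ===== VERDICT (by name: the statement is the Claim_ definition above) =====
theorem f_spec : Claim_equal_f := by
  intro number _
  show f number = f_alt number
  unfold f f_alt
  exact key _ (fun c _ hc => nondigit_count_le_one number c hc)
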